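-- pv_equiv track=rewrite | github.com/memory-eight-way/memory | quiz/make-quiz.py | proc_txt_lv40_49_mask_long_word
-- ===== SOURCE A (Python) =====
-- MASK_CHAR="_"
--
-- def is_memory_line(line_info):
--     """
--     記憶対象の行かを確認する
--     行番号. 文章 の構成になっているか
--     """
--     if len(line_info)!=2:
--         # 行番号＋文章の構成でない
--         return False
--
--     if line_info[1].strip()=="":
--         # 行番号＋文章の構成だけど 文章が空
--         return False
--     return True
--
-- def make_len_dict(line):
--     w_words=line.split(" ")
--     di_len=dict()
--     for wele in w_words:
--         wlen=len(wele)
--         if wlen not in di_len: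
--             di_len[wlen]=0
--         di_len[wlen]=di_len[wlen]+1
--     return di_len
--
-- def proc_line_mask_long_word(line,lv,slv):
--     di_len=make_len_dict(line)
--     wlenkeys=di_len.keys()
--     wlenkeys=sorted(wlenkeys,reverse=True)
--     wwordcounter=0
--     w_del_count=lv-slv+1
--     w_del_len=0
--     for wchklen in wlenkeys:
--         wwordcounter=wwordcounter+di_len[wchklen]
--         if wwordcounter>w_del_count:
--             w_del_len=wchklen
--             break
--     ##if w_del_len==0:
--     #    return ""
--     w_words=line.split(" ")
--     w_ret=list()
--     for w_word in w_words:
--         if len(w_word)>=w_del_len: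
--             w_ret.append(MASK_CHAR*len(w_word))
--         else:
--             w_ret.append(w_word)
--     wretstr= " ".join(w_ret)
--     return wretstr
--
-- def proc_txt_lv40_49_mask_long_word(lines,lv):
--     """
--     lv40 先頭の単語は残して、長い単語を消す
--         lv40 長い単語を1単語以上消す
--         lv41 長い単語を2単語以上消す
--         lv49 長い単語を10単語以上消す
--     """
--
--
--     w_ret=list()
--
--     wcount=0
--     for line in lines:
--         line_info=line_to_number_body_pair(line)
--         if is_memory_line(line_info):
--             w_new_line=line_info[0]+" "+proc_line_mask_long_word(line_info[1],lv,40)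
--             w_ret.append(w_new_line)
--         else:
--             w_ret.append(line)
--     return w_ret
--
-- def line_to_number_body_pair(wline):
--     w_word=wline.strip().split(".")
--     w_line_number=w_word[0]+"."
--     w_line_body=".".join(w_word[1:]).strip()
--     return (w_line_number ,w_line_body)
-- ===== SOURCE B (Python) =====
-- MASK_CHAR = "_"
--
--
-- def line_to_number_body_pair(wline):
--     w_word = wline.strip().split(".")
--     return (w_word[0] + ".", ".".join(w_word[1:]).strip())
--
--
-- def is_memory_line(line_info):
--     if len(line_info) != 2:
--         return False
--     if line_info[1].strip() == "":
--         return False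
--     return True
--
--
-- def mask_long_words(body, lv):
--     words = body.split(" ")
--     keep = max(lv - 40 + 1, 0)
--     lens_desc = sorted((len(w) for w in words), reverse=True)
--     thr = lens_desc[keep] if len(words) > keep else 0
--     return " ".join(MASK_CHAR * len(w) if len(w) >= thr else w for w in words)
--
--
-- def proc_txt_lv40_49_mask_long_word(lines, lv):
--     out = []
--     for line in lines:
--         info = line_to_number_body_pair(line)
--         if is_memory_line(info):
--             out.append(info[0] + " " + mask_long_words(info[1], lv))
--         else:
--             out.append(line)
--     return out
-- ===== Notes on version B (the rewrite author's own statement) =====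
-- stated objective: simpler
-- what changed: B drops the length-frequency dict and the cumulative-count loop over distinct lengths: it sorts the full list of word lengths descending and reads the threshold directly at index max(lv-39,0) (0 when there are too few words), keeping the line parsing unchanged.
import Mathlib
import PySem

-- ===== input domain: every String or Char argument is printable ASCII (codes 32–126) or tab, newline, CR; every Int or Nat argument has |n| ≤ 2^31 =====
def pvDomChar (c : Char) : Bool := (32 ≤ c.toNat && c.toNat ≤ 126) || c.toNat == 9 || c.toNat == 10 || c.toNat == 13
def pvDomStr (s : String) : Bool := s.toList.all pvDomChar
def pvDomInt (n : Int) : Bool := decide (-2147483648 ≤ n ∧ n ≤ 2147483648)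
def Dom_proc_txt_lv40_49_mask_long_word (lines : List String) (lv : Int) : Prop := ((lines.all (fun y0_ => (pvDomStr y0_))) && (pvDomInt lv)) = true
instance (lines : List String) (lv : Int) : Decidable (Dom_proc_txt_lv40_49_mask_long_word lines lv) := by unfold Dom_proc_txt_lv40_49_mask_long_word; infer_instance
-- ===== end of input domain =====

-- B replaces A's length-frequency dict and cumulative-count scan over distinct lengths by a direct
-- index into the descending-sorted list of all word lengths; objective: simpler decomposition.

-- ===== PORT A =====
-- shared helpers: both Python modules contain these identical functions (line parsing / line test / mask)
-- line_to_number_body_pair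
def lineToNumberBodyPair (wline : String) : String × String :=
  let w_word := PySem.Chars.splitOn (PySem.Chars.strip wline.toList) ['.']
  (String.mk (w_word.headD [] ++ ['.']),
   String.mk (PySem.Chars.strip (PySem.Chars.join ['.'] w_word.tail)))

-- is_memory_line (line_info is always a pair, so the len(line_info)!=2 branch never fires)
def isMemoryLine (line_info : String × String) : Bool :=
  if PySem.Chars.strip line_info.2.toList = [] then false else true

-- MASK_CHAR*len(w_word) — '_' repeated over the word's characters
def maskOf (w : List Char) : List Char := List.replicate w.length '_'

-- make_len_dict
def makeLenDict (line : String) : PySem.Dict Int Int :=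
  (PySem.Chars.splitOn line.toList [' ']).foldl
    (fun d wele =>
      let wlen : Int := PySem.Chars.len wele
      let d1 := if d.contains wlen then d else d.insert wlen 0
      d1.insert wlen (d1.getD wlen 0 + 1))
    PySem.Dict.empty

-- the 'for wchklen in wlenkeys: … break' loop of proc_line_mask_long_word
def findDelLen (keys : List Int) (di_len : PySem.Dict Int Int) (wwordcounter c : Int) : Int :=
  match keys with
  | [] => 0
  | wchklen :: rest =>
    let wwordcounter := wwordcounter + di_len.getD wchklen 0
    if wwordcounter > c then wchklen else findDelLen rest di_len wwordcounter c

-- proc_line_mask_long_word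
def procLineMaskLongWord (line : String) (lv slv : Int) : String :=
  let di_len := makeLenDict line
  let wlenkeys := PySem.List.sorted di_len.keys (fun x => x) true
  let w_del_len := findDelLen wlenkeys di_len 0 (lv - slv + 1)
  let w_words := PySem.Chars.splitOn line.toList [' ']
  String.mk (PySem.Chars.join [' ']
    (w_words.map (fun w => if PySem.Chars.len w ≥ w_del_len then maskOf w else w)))

def proc_txt_lv40_49_mask_long_word (lines : List String) (lv : Int) : List String :=
  lines.map (fun line =>
    let line_info := lineToNumberBodyPair line
    if isMemoryLine line_info then
      line_info.1 ++ " " ++ procLineMaskLongWord line_info.2 lv 40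
    else
      line)

-- ===== PORT B =====
-- mask_long_words of Source B: threshold read off the descending-sorted list of all word lengths
def maskLongWords (body : String) (lv : Int) : String :=
  let words := PySem.Chars.splitOn body.toList [' ']
  let keep : Int := max (lv - 40 + 1) 0
  let lensDesc := PySem.List.sorted (words.map PySem.Chars.len) (fun x => x) true
  let thr : Int := if PySem.List.len words > keep then PySem.List.pyGetD lensDesc keep 0 else 0
  String.mk (PySem.Chars.join [' ']
    (words.map (fun w => if PySem.Chars.len w ≥ thr then maskOf w else w)))

def proc_txt_lv40_49_mask_long_word_alt (lines : List String) (lv : Int) : List String :=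
  lines.map (fun line =>
    let info := lineToNumberBodyPair line
    if isMemoryLine info then
      info.1 ++ " " ++ maskLongWords info.2 lv
    else
      line)

-- ===== PRECONDITION & SPEC =====
def Spec_proc_txt_lv40_49_mask_long_word (lines : List String) (lv : Int) (out : List String) : Prop := out = proc_txt_lv40_49_mask_long_word_alt lines lv
instance (lines : List String) (lv : Int) (out : List String) : Decidable (Spec_proc_txt_lv40_49_mask_long_word lines lv out) := by unfold Spec_proc_txt_lv40_49_mask_long_word; infer_instance

-- ===== CLAIM (what is proved, stated in full; the proofs are below) =====
def Claim_equal_proc_txt_lv40_49_mask_long_word : Prop := ∀ (lines : List String) (lv : Int), Dom_proc_txt_lv40_49_mask_long_word lines lv → Spec_proc_txt_lv40_49_mask_long_word lines lv (proc_txt_lv40_49_mask_long_word lines lv)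

-- ===== LEMMAS AND PROOFS =====

-- A's two-statement dict update is one overwrite-insert
theorem step_eq (d : PySem.Dict Int Int) (x : Int) :
    (let d1 := if d.contains x then d else d.insert x 0;
     d1.insert x (d1.getD x 0 + 1)) = d.insert x (d.getD x 0 + 1) := by
  by_cases h : d.contains x = true
  · simp [h]
  · simp only [h, if_false, Bool.false_eq_true]
    rw [PySem.Dict.getD_insert_self, PySem.Dict.insert_insert_self,
      PySem.Dict.getD_of_not_contains d _ (by simpa using h)]

-- A's dict-build loop is the standard counter over the word lengths
theorem makeLenDict_eq_counter (line : String) :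
    makeLenDict line =
      PySem.Dict.counter ((PySem.Chars.splitOn line.toList [' ']).map PySem.Chars.len) := by
  unfold makeLenDict
  rw [← PySem.Dict.foldl_insert_getD_add_one_eq_counter, List.foldl_map]
  congr 1
  funext d wele
  exact step_eq d (PySem.Chars.len wele)

-- A's cumulative scan over distinct lengths = direct index into the grouped flattening
theorem findDelLen_spec (lens : List Int) (c : Int) :
    ∀ (K : List Int) (acc : Int), (∀ k ∈ K, 0 < List.count k lens) →
      findDelLen K (PySem.Dict.counter lens) acc c =
        (if (((K.flatMap (fun k => List.replicate (List.count k lens) k)).length : Int) > c - acc)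
         then (K.flatMap (fun k => List.replicate (List.count k lens) k)).getD (c - acc).toNat 0
         else 0) := by
  intro K
  induction K with
  | nil => intro acc _; simp [findDelLen]
  | cons k rest ih =>
    intro acc hpos
    have hk : 0 < List.count k lens := hpos k (by simp)
    have hrest : ∀ k' ∈ rest, 0 < List.count k' lens := fun k' h => hpos k' (by simp [h])
    simp only [findDelLen, PySem.Dict.getD_counter, List.flatMap_cons, List.length_append,
      List.length_replicate]
    by_cases hbr : acc + (List.count k lens : Int) > c
    · -- break: the first length whose cumulative count exceeds c
      rw [if_pos hbr]
      have hidx : (c - acc).toNat < List.count k lens := by omega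
      have hcond : ((List.count k lens + (List.flatMap (fun k => List.replicate (List.count k lens) k) rest).length : Nat) : Int) > c - acc := by
        push_cast; omega
      rw [if_pos hcond, List.getD_append _ _ _ _ (by simpa using hidx)]
      simp [List.getD_eq_getElem?_getD, hidx]
    · rw [if_neg hbr, ih (acc + (List.count k lens : Int)) hrest]
      have harith : c - (acc + (List.count k lens : Int)) = c - acc - List.count k lens := by ring
      rw [harith]
      by_cases hcond : ((List.flatMap (fun k => List.replicate (List.count k lens) k) rest).length : Int) > c - acc - List.count k lens
      · rw [if_pos hcond, if_pos (by push_cast; omega)]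
        rw [List.getD_append_right _ _ _ _ (by simp; omega)]
        congr 1
        simp only [List.length_replicate]
        omega
      · rw [if_neg hcond, if_neg (by push_cast at hcond ⊢; omega)]

-- the grouped flattening of the distinct lengths, taken in descending order, IS sorted(lens, reverse=True)
theorem count_flatMap_replicate (lens : List Int) (v : Int) :
    ∀ (K : List Int), K.Nodup →
      List.count v (K.flatMap (fun k => List.replicate (List.count k lens) k)) =
        (if v ∈ K then List.count v lens else 0) := by
  intro K
  induction K with
  | nil => simp
  | cons k rest ih =>
    intro hnd
    rw [List.flatMap_cons, List.count_append, List.count_replicate,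
      ih (List.nodup_cons.mp hnd).2]
    by_cases hv : v = k
    · subst hv
      simp [(List.nodup_cons.mp hnd).1]
    · simp [hv, Ne.symm hv]

theorem pairwise_flatMap_replicate (lens : List Int) :
    ∀ (K : List Int), K.Pairwise (fun a b => b < a) →
      (K.flatMap (fun k => List.replicate (List.count k lens) k)).Pairwise (fun a b => b ≤ a) := by
  intro K
  induction K with
  | nil => simp
  | cons k rest ih =>
    intro hpw
    rw [List.flatMap_cons, List.pairwise_append]
    refine ⟨by rw [List.pairwise_replicate]; right; exact le_refl k,
      ih (List.pairwise_cons.mp hpw).2, ?_⟩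
    intro a ha b hb
    have hak : a = k := List.eq_of_mem_replicate ha
    obtain ⟨k', hk', hbk'⟩ := List.mem_flatMap.mp hb
    have hbk : b = k' := List.eq_of_mem_replicate hbk'
    have : k' < k := (List.pairwise_cons.mp hpw).1 k' hk'
    omega

theorem flat_eq_sorted (lens : List Int) :
    (PySem.List.sorted (PySem.Set.ofList lens) (fun x => x) true).flatMap
        (fun k => List.replicate (List.count k lens) k) =
      PySem.List.sorted lens (fun x => x) true := by
  set K := PySem.List.sorted (PySem.Set.ofList lens) (fun x => x) true with hK
  have hKperm : K.Perm (PySem.Set.ofList lens) := PySem.List.sorted_perm _ _ _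
  have hKnd : K.Nodup := hKperm.nodup_iff.mpr (PySem.Set.nodup_ofList lens)
  have hKdesc : K.Pairwise (fun a b => b < a) := by
    have h1 : K.Pairwise (fun a b : Int => b ≤ a) := PySem.List.sorted_pairwise_rev _ _
    have h2 : K.Pairwise (fun a b : Int => a ≠ b) := hKnd
    exact (h1.and h2).imp (fun h => lt_of_le_of_ne h.1 (Ne.symm h.2))
  set L := K.flatMap (fun k => List.replicate (List.count k lens) k) with hL
  have hperm : L.Perm lens := by
    rw [List.perm_iff_count]
    intro v
    rw [hL, count_flatMap_replicate lens v K hKnd]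
    by_cases hv : v ∈ lens
    · simp [hKperm.mem_iff.mpr ((PySem.Set.mem_ofList lens v).mpr hv)]
    · have : v ∉ K := fun h => hv ((PySem.Set.mem_ofList lens v).mp (hKperm.mem_iff.mp h))
      simp [this, List.count_eq_zero.mpr hv]
  have hLpw : L.Pairwise (fun a b => b ≤ a) := pairwise_flatMap_replicate lens K hKdesc
  exact List.eq_of_perm_of_sorted
    (fun a b _ _ h1 h2 => le_antisymm h2 h1)
    hLpw (PySem.List.sorted_pairwise_rev _ _)
    (hperm.trans (PySem.List.sorted_perm lens (fun x => x) true).symm)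

-- every sorted dict key is a length that actually occurs
theorem keys_count_pos (lens : List Int) :
    ∀ k ∈ PySem.List.sorted (PySem.Set.ofList lens) (fun x => x) true, 0 < List.count k lens := by
  intro k hk
  have : k ∈ lens := (PySem.Set.mem_ofList lens k).mp
    ((PySem.List.sorted_perm _ _ _).mem_iff.mp hk)
  exact List.count_pos_iff.mpr this

-- the two threshold computations agree on every line and level
theorem threshold_eq (line : String) (lv : Int) :
    procLineMaskLongWord line lv 40 = maskLongWords line lv := by
  have hthr :
      findDelLen
          (PySem.List.sorted (makeLenDict line).keys (fun x => x) true)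
          (makeLenDict line) 0 (lv - 40 + 1) =
        (if PySem.List.len (PySem.Chars.splitOn line.toList [' ']) > max (lv - 40 + 1) 0
         then PySem.List.pyGetD
            (PySem.List.sorted ((PySem.Chars.splitOn line.toList [' ']).map PySem.Chars.len)
              (fun x => x) true)
            (max (lv - 40 + 1) 0) 0
         else 0) := by
    set words := PySem.Chars.splitOn line.toList [' '] with hwords
    set lens := words.map PySem.Chars.len with hlens
    set c : Int := lv - 40 + 1 with hc
    rw [makeLenDict_eq_counter, PySem.Dict.keys_counter, ← hwords, ← hlens,
      findDelLen_spec lens c _ 0 (keys_count_pos lens), flat_eq_sorted lens, sub_zero]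
    have hlen : (PySem.List.sorted lens (fun x => x) true).length = words.length := by
      rw [(PySem.List.sorted_perm lens (fun x => x) true).length_eq, hlens, List.length_map]
    have hmax : max c 0 = ((c.toNat : Nat) : Int) := by omega
    rw [hmax, PySem.List.pyGetD_natCast]
    simp only [PySem.List.len_eq, hlen]
    by_cases hcnonneg : 0 ≤ c
    · by_cases hcond : ((words.length : Nat) : Int) > c
      · rw [if_pos hcond, if_pos (by omega)]
      · rw [if_neg hcond, if_neg (by omega)]
    · -- c < 0: A's guard is always true, B's needs a word; with no words both sides give 0
      rw [if_pos (by omega)]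
      by_cases hw : 0 < words.length
      · rw [if_pos (by omega)]
      · have hwnil : words = [] := List.eq_nil_of_length_eq_zero (by omega)
        have hsnil : PySem.List.sorted lens (fun x => x) true = [] := by
          rw [hlens, hwnil]; rfl
        rw [if_neg (by omega), hsnil]
        rfl
  unfold procLineMaskLongWord maskLongWords
  dsimp only
  rw [hthr]

-- ===== VERDICT (by name: the statement is the Claim_ definition above) =====
theorem proc_txt_lv40_49_mask_long_word_spec : Claim_equal_proc_txt_lv40_49_mask_long_word := by
  intro lines lv _
  unfold Spec_proc_txt_lv40_49_mask_long_word
  unfold proc_txt_lv40_49_mask_long_word proc_txt_lv40_49_mask_long_word_alt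
  apply List.map_congr_left
  intro line _
  dsimp only
  rw [threshold_eq]
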